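-- pv_equiv track=rewrite | github.com/TheAbyssBr0/ProjectWanda | app_v1.0.py | calc_coordinates
-- ===== SOURCE A (Python) =====
-- catch_continuous = True                                # this is for catching continuous terms
--
-- def calc_coordinates(in_string, sw_set, mw_dict):
-- 	"""
-- 	Finds the location of the target words in in_string
--
-- 	:param mw_dict: a dictionary containing multiple word turgets
-- 	:param sw_set: a set containing single word targets
-- 	:param in_string: the input string
-- 	:return: a list of (tuples of) coordinates
-- 	"""
-- 	coordinate_list = list()
-- 	word = ""
-- 	for i in range(len(in_string)):
-- 		if in_string[i].isalpha():
-- 			word += in_string[i].lower()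
-- 		else:
-- 			if (word in sw_set) or (word[-3:] == "ing" and catch_continuous):
-- 				coordinate_list.append((i-len(word), len(word)))
-- 			elif word in mw_dict:
-- 				for target_word in mw_dict[word]:
-- 					spotlight_word = in_string[i:i+len(target_word)]
-- 					spotlight_word.replace('\n', ' ')
-- 					if target_word == spotlight_word:
-- 						coordinate_list.append((i - len(word), len(word + target_word)))
-- 			word = ""
-- 	return coordinate_list
-- ===== SOURCE B (Python) =====
-- def calc_coordinates(in_string, sw_set, mw_dict):
--     # Tokenize first: each (delimiter index, preceding lowercased alpha run),
--     # then classify each token.  A trailing alpha run has no delimiter and is dropped.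
--     n = len(in_string)
--     tokens = []
--     i = 0
--     while i < n:
--         start = i
--         while i < n and in_string[i].isalpha():
--             i += 1
--         if i < n:
--             tokens.append((i, in_string[start:i].lower()))
--             i += 1
--     coords = []
--     for i, word in tokens:
--         if word in sw_set or word.endswith("ing"):
--             coords.append((i - len(word), len(word)))
--         elif word in mw_dict:
--             for t in mw_dict[word]:
--                 if in_string[i:i + len(t)] == t:
--                     coords.append((i - len(word), len(word) + len(t)))
--     return coords
-- ===== Notes on version B (the rewrite author's own statement) =====
-- stated objective: alternative
-- what changed: A classifies inline inside a single character-by-character loop carrying a growing word accumulator; B first tokenizes the string into (delimiter index, lowercased word) pairs with a nested-scan tokenizer and then classifies each token in a separate pass.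
import Mathlib
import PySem

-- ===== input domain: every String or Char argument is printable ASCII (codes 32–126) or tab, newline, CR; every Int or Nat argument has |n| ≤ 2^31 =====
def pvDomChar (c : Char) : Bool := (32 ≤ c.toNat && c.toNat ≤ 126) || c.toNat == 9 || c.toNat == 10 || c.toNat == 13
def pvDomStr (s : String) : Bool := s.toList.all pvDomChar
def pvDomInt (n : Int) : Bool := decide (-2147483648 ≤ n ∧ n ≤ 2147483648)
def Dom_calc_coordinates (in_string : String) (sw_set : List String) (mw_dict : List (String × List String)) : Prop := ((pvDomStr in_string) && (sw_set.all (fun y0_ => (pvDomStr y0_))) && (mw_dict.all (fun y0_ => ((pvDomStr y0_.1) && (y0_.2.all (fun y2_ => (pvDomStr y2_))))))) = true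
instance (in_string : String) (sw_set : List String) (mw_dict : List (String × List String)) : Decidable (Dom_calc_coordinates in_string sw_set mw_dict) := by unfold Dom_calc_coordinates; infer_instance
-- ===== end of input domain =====

-- B re-decomposes A's single character loop into tokenize-then-classify (no speed claim);
-- equal return values proved on the whole domain.

-- ===== PORT A =====
-- catch_continuous = True (module constant)
def pvCatchContinuous : Bool := true

def calc_coordinates (in_string : String) (sw_set : List String) (mw_dict : List (String × List String)) : List (Int × Int) :=
  let cs := in_string.toList
  ((PySem.List.pyRange 0 (PySem.List.len cs) 1).foldl
    (fun (st : List (Int × Int) × List Char) (i : Int) =>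
      let c := PySem.List.pyGetD cs i ' '
      if PySem.Chars.isalpha c then
        (st.1, st.2 ++ [PySem.Chars.lowerChar c])
      else
        let word := st.2
        let cl :=
          if sw_set.any (fun s => s.toList == word) ||
             (PySem.List.slice word (some (-3)) none == ['i','n','g'] && pvCatchContinuous) then
            st.1 ++ [(i - (word.length : Int), (word.length : Int))]
          else
            match mw_dict.find? (fun p => p.1.toList == word) with
            | some kv =>
                kv.2.foldl (fun acc t =>
                  let spotlight := PySem.List.slice cs (some i) (some (i + (t.toList.length : Int)))
                  if t.toList == spotlight then
                    acc ++ [(i - (word.length : Int), ((word.length + t.toList.length : Nat) : Int))]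
                  else acc) st.1
            | none => st.1
        (cl, ([] : List Char)))
    (([] : List (Int × Int)), ([] : List Char))).1

-- ===== PORT B =====
-- tokenizer: outer while over the string, inner while (takeWhile/dropWhile) consuming one
-- alpha run; emits (delimiter index, lowercased run); a trailing run with no delimiter is dropped.
-- fuel = number of characters left makes the recursion structural; each step consumes ≥ 1 char.
def pvTokensF : Nat → List Char → Nat → List (Nat × List Char)
  | 0, _, _ => []
  | fuel + 1, cs, i =>
    let run := cs.takeWhile PySem.Chars.isalpha
    match cs.dropWhile PySem.Chars.isalpha with
    | [] => []
    | _ :: rest =>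
        (i + run.length, PySem.Chars.lower run) :: pvTokensF fuel rest (i + run.length + 1)

def calc_coordinates_alt (in_string : String) (sw_set : List String) (mw_dict : List (String × List String)) : List (Int × Int) :=
  let cs := in_string.toList
  (pvTokensF cs.length cs 0).foldl
    (fun (coords : List (Int × Int)) (tok : Nat × List Char) =>
      let i : Int := (tok.1 : Int)
      let word := tok.2
      if sw_set.any (fun s => s.toList == word) ||
         PySem.Chars.endswith word ['i','n','g'] then
        coords ++ [(i - (word.length : Int), (word.length : Int))]
      else
        match mw_dict.find? (fun p => p.1.toList == word) with
        | some kv =>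
            kv.2.foldl (fun acc t =>
              if t.toList == PySem.List.slice cs (some i) (some (i + (t.toList.length : Int))) then
                acc ++ [(i - (word.length : Int), ((word.length + t.toList.length : Nat) : Int))]
              else acc) coords
        | none => coords)
    []

-- ===== PRECONDITION & SPEC =====
def Spec_calc_coordinates (in_string : String) (sw_set : List String) (mw_dict : List (String × List String)) (out : List (Int × Int)) : Prop := out = calc_coordinates_alt in_string sw_set mw_dict
instance (in_string : String) (sw_set : List String) (mw_dict : List (String × List String)) (out : List (Int × Int)) : Decidable (Spec_calc_coordinates in_string sw_set mw_dict out) := by unfold Spec_calc_coordinates; infer_instance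

-- ===== CLAIM (what is proved, stated in full; the proofs are below) =====
def Claim_equal_calc_coordinates : Prop := ∀ (in_string : String) (sw_set : List String) (mw_dict : List (String × List String)), Dom_calc_coordinates in_string sw_set mw_dict → Spec_calc_coordinates in_string sw_set mw_dict (calc_coordinates in_string sw_set mw_dict)

-- ===== LEMMAS AND PROOFS =====

-- A's step on a delimiter = B's per-token step (shared classification body).
def pvClassify (cs : List Char) (sw_set : List String) (mw_dict : List (String × List String))
    (coords : List (Int × Int)) (i : Int) (word : List Char) : List (Int × Int) :=
  if sw_set.any (fun s => s.toList == word) || PySem.Chars.endswith word ['i','n','g'] then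
    coords ++ [(i - (word.length : Int), (word.length : Int))]
  else
    match mw_dict.find? (fun p => p.1.toList == word) with
    | some kv =>
        kv.2.foldl (fun acc t =>
          if t.toList == PySem.List.slice cs (some i) (some (i + (t.toList.length : Int))) then
            acc ++ [(i - (word.length : Int), ((word.length + t.toList.length : Nat) : Int))]
          else acc) coords
    | none => coords

-- word[-3:] == "ing"  ↔  word.endswith("ing")
lemma pv_ing_eq (w : List Char) :
    (PySem.List.slice w (some (-3)) none == ['i','n','g']) = PySem.Chars.endswith w ['i','n','g'] := by
  rw [PySem.List.slice_from_neg_ofNat w 3 (by norm_num), Bool.eq_iff_iff]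
  rw [beq_iff_eq, PySem.Chars.endswith, List.isSuffixOf_iff_suffix, List.suffix_iff_eq_drop]
  simp [eq_comm]

-- tokensAux: B's tokenizer restated with A's pending-word accumulator
def pvTokensAux : List Char → Nat → List Char → List (Nat × List Char)
  | [], _, _ => []
  | c :: rest, j, w =>
    if PySem.Chars.isalpha c then pvTokensAux rest (j + 1) (w ++ [PySem.Chars.lowerChar c])
    else (j, w) :: pvTokensAux rest (j + 1) []

def pvPrepW (w : List Char) : List (Nat × List Char) → List (Nat × List Char)
  | [] => []
  | (j, u) :: ts => (j, w ++ u) :: ts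

lemma pvTokensF_nil (f : Nat) (j : Nat) : pvTokensF f [] j = [] := by
  cases f <;> simp [pvTokensF]

lemma pvTokensF_fuel : ∀ (f f' : Nat) (u : List Char) (j : Nat),
    u.length ≤ f → u.length ≤ f' → pvTokensF f u j = pvTokensF f' u j := by
  intro f
  induction f with
  | zero =>
    intro f' u j hu _
    have : u = [] := List.length_eq_zero_iff.mp (Nat.le_zero.mp hu)
    subst this
    simp [pvTokensF, pvTokensF_nil]
  | succ f ih =>
    intro f' u j hu hu'
    cases u with
    | nil => simp [pvTokensF_nil]
    | cons c rest =>
      cases f' with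
      | zero => simp at hu'
      | succ f' =>
        simp only [pvTokensF]
        cases hd : (c :: rest).dropWhile PySem.Chars.isalpha with
        | nil => rfl
        | cons d rest2 =>
          have hlen : rest2.length + 1 ≤ rest.length + 1 := by
            have := List.length_dropWhile_le PySem.Chars.isalpha (c :: rest)
            rw [hd] at this; simpa using this
          have h1 : rest2.length ≤ f := by simp at hu; omega
          have h2 : rest2.length ≤ f' := by simp at hu'; omega
          simp only [ih f' rest2 _ h1 h2]

lemma pvPrepW_nil (ts : List (Nat × List Char)) : pvPrepW [] ts = ts := by
  cases ts with
  | nil => rfl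
  | cons t ts => cases t; simp [pvPrepW]

lemma pvTokensAux_eq_f : ∀ (f : Nat) (u : List Char) (j : Nat) (w : List Char),
    u.length ≤ f → pvTokensAux u j w = pvPrepW w (pvTokensF f u j) := by
  intro f
  induction f with
  | zero =>
    intro u j w hu
    have : u = [] := List.length_eq_zero_iff.mp (Nat.le_zero.mp hu)
    subst this
    simp [pvTokensAux, pvTokensF, pvPrepW]
  | succ f ih =>
    intro u j w hu
    cases u with
    | nil => simp [pvTokensAux, pvTokensF_nil, pvPrepW]
    | cons c rest =>
      have hrest : rest.length ≤ f := by simp at hu; omega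
      by_cases ha : PySem.Chars.isalpha c
      · rw [show pvTokensAux (c :: rest) j w
              = pvTokensAux rest (j + 1) (w ++ [PySem.Chars.lowerChar c]) by
            simp [pvTokensAux, ha]]
        rw [ih rest (j + 1) _ hrest]
        simp only [pvTokensF, List.takeWhile_cons, List.dropWhile_cons, ha, if_true]
        cases hd : rest.dropWhile PySem.Chars.isalpha with
        | nil =>
          rw [show pvTokensF f rest (j + 1) = [] from ?_]
          · rfl
          · cases f with
            | zero => rfl
            | succ f => simp only [pvTokensF]; rw [hd]
        | cons d rest2 =>
          have hlen : rest2.length + 1 ≤ rest.length := by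
            have := List.length_dropWhile_le PySem.Chars.isalpha rest
            rw [hd] at this; simpa using this
          simp at hu
          cases f with
          | zero => omega
          | succ f =>
            simp only [pvTokensF]
            rw [hd]
            simp only [pvPrepW, PySem.Chars.lower, List.map_cons, List.length_cons]
            have e1 : j + 1 + (List.takeWhile PySem.Chars.isalpha rest).length
                = j + ((List.takeWhile PySem.Chars.isalpha rest).length + 1) := by omega
            rw [e1, pvTokensF_fuel f (f + 1) rest2
                  (j + ((List.takeWhile PySem.Chars.isalpha rest).length + 1) + 1)
                  (by omega) (by omega)]
            simp [pvTokensF, PySem.Chars.lower]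
      · rw [show pvTokensAux (c :: rest) j w = (j, w) :: pvTokensAux rest (j + 1) [] by
            simp [pvTokensAux, ha]]
        rw [ih rest (j + 1) [] hrest, pvPrepW_nil]
        simp only [pvTokensF, List.takeWhile_cons, List.dropWhile_cons, ha]
        simp [pvPrepW, PySem.Chars.lower]

lemma pvTokensAux_eq (u : List Char) : ∀ (j : Nat) (w : List Char),
    pvTokensAux u j w = pvPrepW w (pvTokensF u.length u j) := by
  intro j w
  exact pvTokensAux_eq_f u.length u j w le_rfl

lemma pv_loop_eq (cs : List Char) (sw_set : List String) (mw_dict : List (String × List String)) :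
    ∀ (u : List Char) (j : Nat) (w : List Char) (acc : List (Int × Int)),
    ((PySem.List.enumerate u (j : Int)).foldl
      (fun (st : List (Int × Int) × List Char) (p : Int × Char) =>
        if PySem.Chars.isalpha p.2 then
          (st.1, st.2 ++ [PySem.Chars.lowerChar p.2])
        else
          let word := st.2
          let cl :=
            if sw_set.any (fun s => s.toList == word) ||
               (PySem.List.slice word (some (-3)) none == ['i','n','g'] && pvCatchContinuous) then
              st.1 ++ [(p.1 - (word.length : Int), (word.length : Int))]
            else
              match mw_dict.find? (fun q => q.1.toList == word) with
              | some kv =>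
                  kv.2.foldl (fun acc t =>
                    let spotlight := PySem.List.slice cs (some p.1) (some (p.1 + (t.toList.length : Int)))
                    if t.toList == spotlight then
                      acc ++ [(p.1 - (word.length : Int), ((word.length + t.toList.length : Nat) : Int))]
                    else acc) st.1
              | none => st.1
          (cl, ([] : List Char))) (acc, w)).1
    = (pvTokensAux u j w).foldl (fun coords tok => pvClassify cs sw_set mw_dict coords (tok.1 : Int) tok.2) acc := by
  intro u
  induction u with
  | nil =>
    intro j w acc
    simp [PySem.List.enumerate_nil, pvTokensAux]
  | cons c rest ih =>
    intro j w acc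
    rw [PySem.List.enumerate_cons, List.foldl_cons]
    have hc : ((j : Int) + 1) = ((j + 1 : Nat) : Int) := by push_cast; ring
    by_cases ha : PySem.Chars.isalpha c
    · simp only [ha, if_true, hc]
      rw [ih]
      simp [pvTokensAux, ha]
    · simp only [ha, Bool.false_eq_true, if_false, hc]
      rw [ih]
      rw [show pvTokensAux (c :: rest) j w = (j, w) :: pvTokensAux rest (j + 1) [] by
            simp [pvTokensAux, ha]]
      rw [List.foldl_cons]
      congr 1
      unfold pvClassify
      simp only [pvCatchContinuous, Bool.and_true, pv_ing_eq]

-- ===== VERDICT (by name: the statement is the Claim_ definition above) =====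
theorem calc_coordinates_spec : Claim_equal_calc_coordinates := by
  intro s sw mw _
  unfold Spec_calc_coordinates
  have h := pv_loop_eq s.toList sw mw s.toList 0 [] []
  simp only [Nat.cast_zero] at h
  rw [PySem.List.enumerate_eq_map_pyRange s.toList ' ', List.foldl_map] at h
  rw [pvTokensAux_eq, pvPrepW_nil] at h
  exact h
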